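-- pv_equiv track=rewrite | github.com/vbshuliar/Programming_Projects_and_Labs_from_Ukrainian_Catholic_University | 01/programming/labs/03_functions/01/lab4_task_1.py | convert_to_column
-- ===== SOURCE A (Python) =====
-- def convert_to_column(s):
--     '''
--     str -> str
--     Convert string to a column of words.
--     If argument is not a string function should return None.
--
--     >>> print_column('Revenge is a dish that tastes best when served cold.')
--     revenge
--     is
--     a
--     dish
--     that
--     tastes
--     best
--     when
--     served
--     cold
--     >>> print_column('Never hate your enemies. It affects your judgment.')
--     never
--     hate
--     your
--     enemies
--     it
--     affects
--     your
--     judgment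
--     >>> print_column(2015)
--     None
--     '''
--     result = ""
--     punc = '''!()-[]}{;:'"\,<>./?@#$%^&*_~'''
--     if type(s) != str:
--         return None
--     s = s.lower().split(" ")
--     for num1 in s:
--         for num2 in num1:
--             if num2 in punc:
--                 num1 = num1.replace(num2, "")
--         result += f"{num1}\n"
--     return result.rstrip()
-- ===== SOURCE B (Python) =====
-- def convert_to_column(s):
--     '''
--     str -> str
--     Convert string to a column of words.
--     If argument is not a string function should return None.
--     '''
--     if type(s) != str:
--         return None
--     punc = '''!()-[]}{;:'"\,<>./?@#$%^&*_~'''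
--     cleaned = ''.join(c for c in s.lower() if c not in punc)
--     return '\n'.join(cleaned.split(' ')).rstrip()
-- ===== Notes on version B (the rewrite author's own statement) =====
-- stated objective: idiomatic
-- what changed: A lowercases, splits on spaces, then for each word runs a nested per-character loop of repeated str.replace calls while concatenating each word plus a newline onto a growing result string; B strips punctuation from the whole lowered string in one filtering pass before any splitting, then splits and joins with newlines, dropping the nested replace loop and the string accumulator.
import Mathlib
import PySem

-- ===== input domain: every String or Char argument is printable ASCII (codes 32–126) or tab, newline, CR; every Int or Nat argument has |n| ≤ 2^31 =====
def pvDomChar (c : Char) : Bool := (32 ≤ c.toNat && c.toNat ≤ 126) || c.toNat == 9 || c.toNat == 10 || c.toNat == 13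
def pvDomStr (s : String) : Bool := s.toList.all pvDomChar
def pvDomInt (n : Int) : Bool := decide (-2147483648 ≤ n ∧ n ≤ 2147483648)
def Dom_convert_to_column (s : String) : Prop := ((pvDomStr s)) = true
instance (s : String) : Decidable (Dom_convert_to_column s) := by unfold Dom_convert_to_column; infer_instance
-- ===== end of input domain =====

-- B cleans punctuation from the whole lowered string in one filtering pass before splitting,
-- replacing A's nested per-word replace loop and string accumulator with split + join (idiomatic).


-- the punctuation constant both Pythons share
def pvPunc : List Char := "!()-[]}{;:'\"\\,<>./?@#$%^&*_~".toList

-- ===== PORT A =====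
def convert_to_column (s : String) : Option String :=
  -- type(s) != str is always false here: s : String
  let ws := PySem.Chars.splitOn (PySem.Chars.lower s.toList) [' ']
  let result := ws.foldl (fun result num1 =>
    let num1' := num1.foldl (fun cur num2 =>
      if PySem.Chars.isIn [num2] pvPunc then PySem.Chars.replace cur [num2] [] else cur) num1
    result ++ num1' ++ ['\n']) []
  some (String.ofList (PySem.Chars.rstrip result))

-- ===== PORT B =====
def convert_to_column_alt (s : String) : Option String :=
  let cleaned := (PySem.Chars.lower s.toList).filter (fun c => !(PySem.Chars.isIn [c] pvPunc))
  some (String.ofList (PySem.Chars.rstrip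
    (PySem.Chars.join ['\n'] (PySem.Chars.splitOn cleaned [' ']))))

-- ===== PRECONDITION & SPEC =====
def Spec_convert_to_column (s : String) (out : Option String) : Prop := out = convert_to_column_alt s
instance (s : String) (out : Option String) : Decidable (Spec_convert_to_column s out) := by unfold Spec_convert_to_column; infer_instance

-- ===== CLAIM (what is proved, stated in full; the proofs are below) =====
def Claim_equal_convert_to_column : Prop := ∀ (s : String), Dom_convert_to_column s → Spec_convert_to_column s (convert_to_column s)

-- ===== LEMMAS AND PROOFS =====

-- reference splitter: Python's l.split(" "), structurally
def pvSplit : List Char → List (List Char)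
  | [] => [[]]
  | c :: t =>
    match pvSplit t with
    | [] => [[c]]   -- unreachable: pvSplit never returns []
    | w :: ws => if c = ' ' then [] :: w :: ws else (c :: w) :: ws

lemma pvSplit_ne_nil (l : List Char) : pvSplit l ≠ [] := by
  cases l with
  | nil => simp [pvSplit]
  | cons c t =>
    simp only [pvSplit]
    rcases h : pvSplit t with _ | ⟨w, ws⟩
    · simp
    · simp only []
      split <;> simp

lemma splitOn_go_space (fuel : Nat) :
    ∀ (l cur : List Char) (acc : List (List Char)), l.length ≤ fuel →
    PySem.Chars.splitOn.go [' '] fuel l cur acc =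
      acc.reverse ++ (match pvSplit l with
        | [] => []
        | w :: ws => (cur.reverse ++ w) :: ws) := by
  induction fuel with
  | zero =>
    intro l cur acc h
    have : l = [] := by cases l <;> simp_all
    subst this
    simp [PySem.Chars.splitOn.go, pvSplit]
  | succ n ih =>
    intro l cur acc h
    cases l with
    | nil => simp [PySem.Chars.splitOn.go, pvSplit]
    | cons c rest =>
      rw [PySem.Chars.splitOn.go]
      by_cases hc : c = ' '
      · subst hc
        have hpre : [' '].isPrefixOf (' ' :: rest) = true := by simp [List.isPrefixOf]
        rw [if_pos hpre]
        simp only [List.length_singleton, List.drop_one, List.tail_cons]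
        simp only [List.length_cons] at h
        rw [ih rest [] (List.reverse cur :: acc) (by omega)]
        rcases hs : pvSplit rest with _ | ⟨w, ws⟩
        · exact absurd hs (pvSplit_ne_nil rest)
        · simp [pvSplit, hs]
      · have hpre : [' '].isPrefixOf (c :: rest) = false := by
          simp [List.isPrefixOf]; exact fun h' => hc h'.symm
        rw [if_neg (by simp [hpre])]
        simp only [List.length_cons] at h
        rw [ih rest (c :: cur) acc (by omega)]
        rcases hs : pvSplit rest with _ | ⟨w, ws⟩
        · exact absurd hs (pvSplit_ne_nil rest)
        · simp [pvSplit, hs, hc]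

lemma splitOn_space (l : List Char) :
    PySem.Chars.splitOn l [' '] = pvSplit l := by
  unfold PySem.Chars.splitOn
  rw [splitOn_go_space (l.length + 1) l [] [] (by omega)]
  rcases hs : pvSplit l with _ | ⟨w, ws⟩
  · exact absurd hs (pvSplit_ne_nil l)
  · simp

-- split commutes with a filter that keeps the separator
lemma pvSplit_filter (p : Char → Bool) (hp : p ' ' = true) (l : List Char) :
    pvSplit (l.filter p) = (pvSplit l).map (List.filter p) := by
  induction l with
  | nil => simp [pvSplit]
  | cons c t ih =>
    rcases hs : pvSplit t with _ | ⟨w, ws⟩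
    · exact absurd hs (pvSplit_ne_nil t)
    have ih' : pvSplit (t.filter p) = List.filter p w :: List.map (List.filter p) ws := by
      rw [ih, hs]; simp
    by_cases hpc : p c = true
    · by_cases hc : c = ' '
      · subst hc
        simp [hpc, pvSplit, hs, ih']
      · simp [hpc, pvSplit, hs, ih', hc]
    · have hc : c ≠ ' ' := by intro hcc; rw [hcc, hp] at hpc; exact hpc rfl
      simp [hpc, pvSplit, hs, ih', hc]

-- replace with single-char old and empty new is a filter
lemma replace_go_single (fuel : Nat) :
    ∀ (c : Char) (l acc : List Char), l.length ≤ fuel →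
    PySem.Chars.replace.go [c] [] fuel l acc =
      acc.reverse ++ l.filter (fun x => !(x == c)) := by
  induction fuel with
  | zero =>
    intro c l acc h
    have : l = [] := by cases l <;> simp_all
    subst this
    simp [PySem.Chars.replace.go]
  | succ n ih =>
    intro c l acc h
    cases l with
    | nil => simp [PySem.Chars.replace.go]
    | cons d t =>
      rw [PySem.Chars.replace.go]
      simp only [List.length_cons] at h
      by_cases hd : d = c
      · subst hd
        have hpre : [d].isPrefixOf (d :: t) = true := by simp [List.isPrefixOf]
        rw [if_pos hpre]
        simp only [List.length_singleton, List.drop_one, List.tail_cons, List.reverse_nil,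
          List.nil_append]
        rw [ih d t acc (by omega)]
        simp
      · have hpre : [c].isPrefixOf (d :: t) = false := by
          simp [List.isPrefixOf]; exact fun h' => hd h'.symm
        rw [if_neg (by simp [hpre])]
        rw [ih c t (d :: acc) (by omega)]
        simp [hd]

lemma replace_single (c : Char) (l : List Char) :
    PySem.Chars.replace l [c] [] = l.filter (fun x => !(x == c)) := by
  unfold PySem.Chars.replace
  rw [if_neg (by simp)]
  exact replace_go_single l.length c l [] (le_refl _)

-- the inner per-character replace loop is a filter
lemma inner_fold (inP : Char → Bool) (l : List Char) :
    ∀ cur : List Char,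
    l.foldl (fun cur c => if inP c then PySem.Chars.replace cur [c] [] else cur) cur =
      cur.filter (fun x => !(inP x && l.contains x)) := by
  induction l with
  | nil => intro cur; simp
  | cons c t ih =>
    intro cur
    simp only [List.foldl_cons]
    by_cases hc : inP c = true
    · rw [if_pos hc, replace_single, ih, List.filter_filter]
      apply List.filter_congr
      intro x _
      by_cases hx : x = c <;> simp [hx, hc]
    · rw [if_neg (by simp [hc]), ih]
      apply List.filter_congr
      intro x _
      by_cases hx : x = c
      · subst hx
        simp only [Bool.not_eq_true] at hc
        simp [hc]
      · simp [hx]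

lemma inner_fold_self (inP : Char → Bool) (w : List Char) :
    w.foldl (fun cur c => if inP c then PySem.Chars.replace cur [c] [] else cur) w =
      w.filter (fun x => !(inP x)) := by
  rw [inner_fold]
  apply List.filter_congr
  intro x hx
  simp [hx]

lemma intercalate_cons₂ (a b : List Char) (t : List (List Char)) :
    List.intercalate ['\n'] (a :: b :: t) = a ++ '\n' :: List.intercalate ['\n'] (b :: t) := by
  simp [List.intercalate]

lemma flatMap_eq_intercalate_append (F : List Char → List Char) (ws : List (List Char))
    (h : ws ≠ []) :
    ws.flatMap (fun w => F w ++ ['\n']) = List.intercalate ['\n'] (ws.map F) ++ ['\n'] := by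
  induction ws with
  | nil => simp at h
  | cons w t ih =>
    cases t with
    | nil => simp [List.intercalate]
    | cons w2 t2 =>
      rw [List.flatMap_cons, ih (by simp)]
      simp only [List.map_cons]
      rw [intercalate_cons₂ (F w) (F w2) (List.map F t2)]
      simp

lemma rstrip_append_newline (x : List Char) :
    PySem.Chars.rstrip (x ++ ['\n']) = PySem.Chars.rstrip x := by
  simp [PySem.Chars.rstrip, List.reverse_append,
    show PySem.Chars.isspace '\n' = true from rfl]

lemma outer_fold (ws : List (List Char)) :
    ∀ acc : List Char,
    ws.foldl (fun result num1 =>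
      result ++ (num1.foldl (fun cur num2 =>
        if PySem.Chars.isIn [num2] pvPunc then PySem.Chars.replace cur [num2] [] else cur) num1)
        ++ ['\n']) acc =
      acc ++ ws.flatMap (fun w => w.filter (fun x => !(PySem.Chars.isIn [x] pvPunc)) ++ ['\n']) := by
  induction ws with
  | nil => intro acc; simp
  | cons w t ih =>
    intro acc
    simp only [List.foldl_cons, List.flatMap_cons]
    rw [inner_fold_self, ih]
    simp

-- ===== VERDICT (by name: the statement is the Claim_ definition above) =====
theorem convert_to_column_spec : Claim_equal_convert_to_column := by
  intro s _
  unfold Spec_convert_to_column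
  simp only [convert_to_column, convert_to_column_alt]
  simp only [splitOn_space]
  rw [pvSplit_filter _ (by decide)]
  congr 2
  rw [outer_fold]
  simp only [List.nil_append]
  rw [flatMap_eq_intercalate_append _ _ (pvSplit_ne_nil _), rstrip_append_newline]
  simp [PySem.Chars.join]
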